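-- pv_equiv track=rewrite | github.com/smirnoffmg/EpamPython2019 | 01-Data-Structures/hw/sticks/parser.py | avrg_producing
-- ===== SOURCE A (Python) =====
-- def avrg_producing(data):
--     avrg = {}
--     keys = [[key for key, values in i.items()] for i in data]
--     keys = [val for sublist in keys for val in sublist]
--     keys_pair = dict(zip(set(keys), (keys.count(item) for item in set(keys))))
--     keys = set(keys)
--     avrg = {key: 0 for key in keys}
--     for i in data:
--         for key, value in i.items():
--             avrg[key] += value
--     avrg = [(key, avrg[key] // keys_pair[key]) for key in keys]
--     max_v = max(i[1] for i in avrg)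
--     max_v = {i[0]: i[1] for i in avrg if max_v == i[1]}
--     min_v = min(i[1] for i in avrg)
--     min_v = {i[0]: i[1] for i in avrg if min_v == i[1]}
--     return max_v, min_v
-- ===== SOURCE B (Python) =====
-- def avrg_producing(data):
--     # No accumulator/counter tables: each distinct key's average is computed by
--     # a direct scan of data; the extreme averages are found by sorting.
--     keys = list(dict.fromkeys(k for d in data for k in d))
--     averages = [(k,
--                  sum(d[k] for d in data if k in d)
--                  // sum(1 for d in data if k in d))
--                 for k in keys]
--     ordered = sorted(averages, key=lambda p: p[1])
--     hi = ordered[-1][1]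
--     lo = ordered[0][1]
--     return ({k: v for k, v in averages if v == hi},
--             {k: v for k, v in averages if v == lo})
-- ===== Notes on version B (the rewrite author's own statement) =====
-- stated objective: alternative
-- what changed: Drops A's flattened key list, keys.count table and in-place summing dict entirely: B computes each distinct key's average by scanning data directly with per-key sum/count comprehensions, and finds the extreme averages by sorting the averages once and reading off the first and last entries instead of separate max()/min() generator passes.
import Mathlib
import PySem

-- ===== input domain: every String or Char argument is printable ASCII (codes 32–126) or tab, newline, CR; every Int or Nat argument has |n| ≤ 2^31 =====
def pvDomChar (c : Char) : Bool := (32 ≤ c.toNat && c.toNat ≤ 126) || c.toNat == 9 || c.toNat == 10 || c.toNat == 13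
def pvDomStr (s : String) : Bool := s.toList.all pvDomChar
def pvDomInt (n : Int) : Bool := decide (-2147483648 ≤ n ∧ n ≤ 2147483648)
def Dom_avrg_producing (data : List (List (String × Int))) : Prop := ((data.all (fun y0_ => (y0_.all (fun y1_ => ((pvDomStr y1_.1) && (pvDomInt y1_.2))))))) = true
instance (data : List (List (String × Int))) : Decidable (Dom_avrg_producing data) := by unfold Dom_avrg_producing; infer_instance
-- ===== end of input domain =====

-- B drops A's flattened key list, keys.count table and in-place summing dict: it computes each
-- distinct key's average by scanning data directly and finds the extreme averages by one sort.


-- Both Pythons receive each element of `data` as a dict; the association list denotes that dict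
-- (duplicate keys: last value wins, first-occurrence position), so both ports read the input
-- through this same decoding helper (= the items of the dict the list denotes).
def pvItems (i : List (String × Int)) : List (String × Int) := (PySem.Dict.ofList i).items

-- ===== PORT A =====
def avrg_producing (data : List (List (String × Int))) : (List (String × Int)) × (List (String × Int)) :=
  -- keys = [[key for key, values in i.items()] for i in data]; keys = [val for sublist in keys for val in sublist]
  let keys : List String := (data.map (fun i => (pvItems i).map (fun p => p.1))).flatten
  -- keys = set(keys)
  let ks : PySem.Set String := PySem.Set.ofList keys
  -- keys_pair = dict(zip(set(keys), (keys.count(item) for item in set(keys))))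
  let keys_pair : PySem.Dict String Int :=
    PySem.Dict.ofList (ks.zip (ks.map (fun item => (PySem.List.count keys item : Int))))
  -- avrg = {key: 0 for key in keys}
  let avrg0 : PySem.Dict String Int := PySem.Dict.ofList (ks.map (fun key => (key, (0 : Int))))
  -- for i in data: for key, value in i.items(): avrg[key] += value
  -- (every such key is a key of avrg0, so Python's avrg[key] never raises; getD's default is never used)
  let avrg1 : PySem.Dict String Int :=
    data.foldl (fun d i => (pvItems i).foldl (fun d p => d.insert p.1 (d.getD p.1 0 + p.2)) d) avrg0
  -- avrg = [(key, avrg[key] // keys_pair[key]) for key in keys]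
  let avrgL : List (String × Int) :=
    ks.map (fun key => (key, PySem.Int.floordiv (avrg1.getD key 0) (keys_pair.getD key 0)))
  -- max_v = max(i[1] for i in avrg); min_v likewise (ValueError on empty avrg — excluded by Pre_)
  match PySem.List.max? (avrgL.map (fun p => p.2)) (fun v => v),
        PySem.List.min? (avrgL.map (fun p => p.2)) (fun v => v) with
  | some mx, some mn =>
      ((PySem.Dict.ofList (avrgL.filter (fun p => mx == p.2))).items,
       (PySem.Dict.ofList (avrgL.filter (fun p => mn == p.2))).items)
  | _, _ => ([], [])

-- ===== PORT B =====
def avrg_producing_alt (data : List (List (String × Int))) : (List (String × Int)) × (List (String × Int)) :=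
  -- keys = list(dict.fromkeys(k for d in data for k in d))
  let keys : List String := PySem.List.dedup (data.flatMap (fun d => (PySem.Dict.ofList d).keys))
  -- averages = [(k, sum(d[k] for d in data if k in d) // sum(1 for d in data if k in d)) for k in keys]
  let averages : List (String × Int) := keys.map (fun k =>
    (k, PySem.Int.floordiv
      (((data.filter (fun d => (PySem.Dict.ofList d).contains k)).map
          (fun d => (PySem.Dict.ofList d).getD k 0)).sum)
      (((data.filter (fun d => (PySem.Dict.ofList d).contains k)).map
          (fun _ => (1 : Int))).sum)))
  -- ordered = sorted(averages, key=lambda p: p[1]); hi = ordered[-1][1]; lo = ordered[0][1]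
  -- (IndexError on empty averages — excluded by Pre_)
  let ordered := PySem.List.sorted averages (fun p => p.2) false
  match PySem.List.pyGet? ordered (-1) with
  | none => ([], [])
  | some hi =>
    match PySem.List.pyGet? ordered 0 with
    | none => ([], [])
    | some lo =>
        ((PySem.Dict.ofList (averages.filter (fun q => q.2 == hi.2))).items,
         (PySem.Dict.ofList (averages.filter (fun q => q.2 == lo.2))).items)

-- ===== PRECONDITION & SPEC =====
-- Pre_ excludes exactly the inputs whose dicts are all empty: there Python A raises
-- ValueError (max() of an empty sequence) and Python B raises IndexError (ordered[-1]).
def Pre_avrg_producing (data : List (List (String × Int))) : Prop := ∃ l ∈ data, l ≠ []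
instance (data : List (List (String × Int))) : Decidable (Pre_avrg_producing data) := by unfold Pre_avrg_producing; infer_instance
def pvWitness_avrg_producing : (List (List (String × Int))) := [[("a", 1)]]

def Spec_avrg_producing (data : List (List (String × Int))) (out : (List (String × Int)) × (List (String × Int))) : Prop := out = avrg_producing_alt data
instance (data : List (List (String × Int))) (out : (List (String × Int)) × (List (String × Int))) : Decidable (Spec_avrg_producing data out) := by unfold Spec_avrg_producing; infer_instance

-- ===== CLAIM (what is proved, stated in full; the proofs are below) =====
def Claim_equal_avrg_producing : Prop := ∀ (data : List (List (String × Int))), Dom_avrg_producing data → Pre_avrg_producing data → Spec_avrg_producing data (avrg_producing data)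

-- ===== LEMMAS AND PROOFS =====

-- the common averages list both programs compute, over L = the flattened items of data
def pvAvgs (L : List (String × Int)) : List (String × Int) :=
  (PySem.Set.ofList (L.map (fun p => p.1))).map (fun k =>
    (k, PySem.Int.floordiv (((L.filter (fun p => p.1 == k)).map (fun p => p.2)).sum)
          (((L.filter (fun p => p.1 == k)).length : Int))))

-- A's selection stage: the two max()/min() generator passes and the two filtered dicts
def pvSelA (l : List (String × Int)) : (List (String × Int)) × (List (String × Int)) :=
  match PySem.List.max? (l.map (fun p => p.2)) (fun v => v),
        PySem.List.min? (l.map (fun p => p.2)) (fun v => v) with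
  | some mx, some mn =>
      ((PySem.Dict.ofList (l.filter (fun p => mx == p.2))).items,
       (PySem.Dict.ofList (l.filter (fun p => mn == p.2))).items)
  | _, _ => ([], [])

-- B's selection stage: one sort, first and last entry, and the two filtered dicts
def pvSelB (l : List (String × Int)) : (List (String × Int)) × (List (String × Int)) :=
  match PySem.List.pyGet? (PySem.List.sorted l (fun p => p.2) false) (-1) with
  | none => ([], [])
  | some hi =>
    match PySem.List.pyGet? (PySem.List.sorted l (fun p => p.2) false) 0 with
    | none => ([], [])
    | some lo =>
        ((PySem.Dict.ofList (l.filter (fun q => q.2 == hi.2))).items,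
         (PySem.Dict.ofList (l.filter (fun q => q.2 == lo.2))).items)

-- zip of a list with a map over itself is the graph of the function
theorem pv_zip_map_self {α β : Type} (l : List α) (f : α → β) :
    l.zip (l.map f) = l.map (fun x => (x, f x)) := by
  induction l with
  | nil => rfl
  | cons x t ih => simp [ih]

-- a dict built from the graph of f over nodup keys has exactly that items list
theorem pv_items_ofList_graph (ks : List String) {ν : Type} (f : String → ν) (h : ks.Nodup) :
    (PySem.Dict.ofList (ks.map (fun k => (k, f k)))).items = ks.map (fun k => (k, f k)) := by
  show ((ks.map (fun k => (k, f k))).foldl (fun d p => d.insert p.1 p.2) PySem.Dict.empty).items = _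
  rw [List.foldl_map]
  refine (PySem.Dict.items_foldl_insert_fresh ks (fun k => k) f PySem.Dict.empty
      (fun a _ => PySem.Dict.contains_empty a) (by simpa using h)).trans ?_
  simp [PySem.Dict.empty]

theorem pv_getD_ofList_graph (ks : List String) {ν : Type} (f : String → ν) (h : ks.Nodup)
    {k : String} (hk : k ∈ ks) (d0 : ν) :
    (PySem.Dict.ofList (ks.map (fun k => (k, f k)))).getD k d0 = f k := by
  apply PySem.Dict.getD_of_mem_items
  · rw [pv_items_ofList_graph ks f h]
    exact List.mem_map_of_mem hk
  · exact PySem.Dict.nodup_keys_ofList _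

-- A's summing loop
theorem pv_sum_fold (L : List (String × Int)) (d : PySem.Dict String Int) (k : String) :
    (L.foldl (fun d p => d.insert p.1 (d.getD p.1 0 + p.2)) d).getD k 0
      = d.getD k 0 + ((L.filter (fun p => p.1 == k)).map (fun p => p.2)).sum := by
  induction L generalizing d with
  | nil => simp
  | cons p t ih =>
    simp only [List.foldl_cons, List.filter_cons, ih]
    by_cases hpk : p.1 = k
    · simp [hpk]; ring
    · simp [hpk, PySem.Dict.getD_insert, Ne.symm hpk]

-- A reduces, over the flattened items list L, to pvSelA of the common averages list
theorem pv_A_eq (data : List (List (String × Int))) :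
    avrg_producing data = pvSelA (pvAvgs (data.flatMap pvItems)) := by
  have h1 : (data.map (fun i => (pvItems i).map (fun p => p.1))).flatten
      = (data.flatMap pvItems).map (fun p => p.1) := by
    rw [← List.flatMap_def, List.map_flatMap]
  have h2 : ∀ init : PySem.Dict String Int,
      data.foldl (fun d i => (pvItems i).foldl (fun d p => d.insert p.1 (d.getD p.1 0 + p.2)) d) init
        = (data.flatMap pvItems).foldl (fun d p => d.insert p.1 (d.getD p.1 0 + p.2)) init := by
    intro init; rw [List.foldl_flatMap]
  set L := data.flatMap pvItems with hL
  have hnd : (PySem.Set.ofList (L.map (fun p => p.1))).Nodup := PySem.Set.nodup_ofList _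
  have hcount : ∀ k : String, (PySem.List.count (L.map (fun p => p.1)) k : Int)
      = ((L.filter (fun p => p.1 == k)).length : Int) := by
    intro k
    have : (L.map (fun p => p.1)).count k = (L.filter (fun p => p.1 == k)).length := by
      rw [List.count, List.countP_map, List.countP_eq_length_filter]
      rfl
    rw [PySem.List.count_eq, this]
  have hA : (PySem.Set.ofList (L.map (fun p => p.1))).map (fun key => (key, PySem.Int.floordiv
        ((L.foldl (fun d p => d.insert p.1 (d.getD p.1 0 + p.2))
            (PySem.Dict.ofList ((PySem.Set.ofList (L.map (fun p => p.1))).map (fun key => (key, (0 : Int)))))).getD key 0)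
        ((PySem.Dict.ofList ((PySem.Set.ofList (L.map (fun p => p.1))).zip
            ((PySem.Set.ofList (L.map (fun p => p.1))).map (fun item => (PySem.List.count (L.map (fun p => p.1)) item : Int))))).getD key 0)))
      = pvAvgs L := by
    apply List.map_congr_left
    intro k hk
    have e1 : (L.foldl (fun d p => d.insert p.1 (d.getD p.1 0 + p.2))
        (PySem.Dict.ofList ((PySem.Set.ofList (L.map (fun p => p.1))).map (fun key => (key, (0 : Int)))))).getD k 0
        = ((L.filter (fun p => p.1 == k)).map (fun p => p.2)).sum := by
      rw [pv_sum_fold, pv_getD_ofList_graph _ (fun _ => (0 : Int)) hnd hk, zero_add]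
    have e2 : (PySem.Dict.ofList ((PySem.Set.ofList (L.map (fun p => p.1))).zip
        ((PySem.Set.ofList (L.map (fun p => p.1))).map (fun item => (PySem.List.count (L.map (fun p => p.1)) item : Int))))).getD k 0
        = ((L.filter (fun p => p.1 == k)).length : Int) := by
      rw [pv_zip_map_self, pv_getD_ofList_graph _ _ hnd hk, hcount]
    rw [e1, e2]
  simp only [avrg_producing, pvSelA, h1, h2, hA]

-- the items of a dict, filtered by one key, are that key's single entry (or nothing)
theorem pv_filter_key_unique (l : List (String × Int)) (k : String) (v : Int)
    (h : (l.map Prod.fst).Nodup) (hm : (k, v) ∈ l) :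
    l.filter (fun p => p.1 == k) = [(k, v)] := by
  induction l with
  | nil => cases hm
  | cons p t ih =>
    rw [List.map_cons, List.nodup_cons] at h
    rcases List.mem_cons.mp hm with hp | hp
    · subst hp
      simp only [List.filter_cons, beq_self_eq_true, if_pos]
      simp only [List.cons.injEq, true_and]
      apply List.filter_eq_nil_iff.mpr
      intro q hq hk
      have hq1 : q.1 ∈ t.map Prod.fst := List.mem_map_of_mem (f := Prod.fst) hq
      rw [beq_iff_eq.mp hk] at hq1
      exact h.1 hq1
    · have hne : p.1 ≠ k := by
        intro he
        exact h.1 (he ▸ (List.mem_map_of_mem (f := Prod.fst) hp : (k, v).1 ∈ t.map Prod.fst))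
      simp only [List.filter_cons, beq_iff_eq, hne, ite_false]
      exact ih h.2 hp

theorem pv_filter_items (d : List (String × Int)) (k : String) :
    (pvItems d).filter (fun p => p.1 == k)
      = (if (PySem.Dict.ofList d).contains k then [(k, (PySem.Dict.ofList d).getD k 0)] else []) := by
  by_cases hc : (PySem.Dict.ofList d).contains k
  · rw [if_pos hc]
    have hk : k ∈ (PySem.Dict.ofList d).keys := (PySem.Dict.contains_iff_mem_keys _ _).mp hc
    have hnd : (PySem.Dict.ofList d).keys.Nodup := PySem.Dict.nodup_keys_ofList d
    simp only [PySem.Dict.keys] at hk hnd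
    obtain ⟨⟨k', v⟩, hmem, hfst⟩ := List.mem_map.mp hk
    have hfst' : k' = k := hfst
    rw [hfst'] at hmem
    have hv : (PySem.Dict.ofList d).getD k 0 = v := PySem.Dict.getD_of_mem_items _ hmem hnd 0
    rw [hv]
    exact pv_filter_key_unique _ k v hnd hmem
  · rw [if_neg hc]
    apply List.filter_eq_nil_iff.mpr
    intro p hp hk
    apply hc
    rw [PySem.Dict.contains_iff_mem_keys]
    simp only [PySem.Dict.keys]
    have hp1 : p.1 ∈ (PySem.Dict.ofList d).items.map Prod.fst := List.mem_map_of_mem (f := Prod.fst) hp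
    rw [beq_iff_eq.mp hk] at hp1
    exact hp1

-- a guarded singleton flatMap is a map over the filtered list
theorem pv_flatMap_ite {α β : Type} (l : List α) (P : α → Bool) (f : α → β) :
    l.flatMap (fun a => if P a then [f a] else []) = (l.filter P).map f := by
  induction l with
  | nil => rfl
  | cons a t ih =>
    by_cases hp : P a <;> simp [hp, ih]

-- the flattened items filtered by key k = one entry per dict containing k
theorem pv_filter_flat (data : List (List (String × Int))) (k : String) :
    (data.flatMap pvItems).filter (fun p => p.1 == k)
      = (data.filter (fun d => (PySem.Dict.ofList d).contains k)).map
          (fun d => (k, (PySem.Dict.ofList d).getD k 0)) := by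
  rw [List.filter_flatMap]
  rw [show (fun d => (pvItems d).filter (fun p => p.1 == k))
        = (fun d => if (PySem.Dict.ofList d).contains k
            then [(k, (PySem.Dict.ofList d).getD k 0)] else []) from funext (fun d => pv_filter_items d k)]
  exact pv_flatMap_ite data _ _

-- B reduces, over the flattened items list L, to pvSelB of the common averages list
theorem pv_B_eq (data : List (List (String × Int))) :
    avrg_producing_alt data = pvSelB (pvAvgs (data.flatMap pvItems)) := by
  set L := data.flatMap pvItems with hL
  have hkeys : PySem.List.dedup (data.flatMap (fun d => (PySem.Dict.ofList d).keys))
      = PySem.Set.ofList (L.map (fun p => p.1)) := by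
    rw [PySem.List.dedup_eq_ofList, hL, List.map_flatMap]
    rfl
  have havg : (PySem.Set.ofList (L.map (fun p => p.1))).map (fun k =>
      (k, PySem.Int.floordiv
        (((data.filter (fun d => (PySem.Dict.ofList d).contains k)).map
            (fun d => (PySem.Dict.ofList d).getD k 0)).sum)
        (((data.filter (fun d => (PySem.Dict.ofList d).contains k)).map
            (fun _ => (1 : Int))).sum)))
      = pvAvgs L := by
    apply List.map_congr_left
    intro k _
    have hf := pv_filter_flat data k
    rw [← hL] at hf
    have e1 : ((L.filter (fun p => p.1 == k)).map (fun p => p.2)).sum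
        = ((data.filter (fun d => (PySem.Dict.ofList d).contains k)).map
            (fun d => (PySem.Dict.ofList d).getD k 0)).sum := by
      rw [hf, List.map_map]
      rfl
    have e2 : ((L.filter (fun p => p.1 == k)).length : Int)
        = ((data.filter (fun d => (PySem.Dict.ofList d).contains k)).map
            (fun _ => (1 : Int))).sum := by
      rw [hf, List.length_map, PySem.List.sum_map_const_int, mul_one]
    rw [e1, e2]
  simp only [avrg_producing_alt, pvSelB, hkeys, havg]

-- in a value-sorted list the last entry's value bounds every entry's value
theorem pv_pairwise_getLast (l : List (String × Int)) (h : l ≠ [])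
    (hp : l.Pairwise (fun a b => a.2 ≤ b.2)) : ∀ y ∈ l, y.2 ≤ (l.getLast h).2 := by
  induction l with
  | nil => cases h rfl
  | cons a t ih =>
    intro y hy
    cases t with
    | nil => simp at hy; simp [hy]
    | cons b u =>
      rw [List.getLast_cons (by simp)]
      rw [List.pairwise_cons] at hp
      rcases List.mem_cons.mp hy with rfl | hy'
      · exact le_trans (hp.1 _ (List.getLast_mem _)) (le_refl _)
      · exact ih (by simp) hp.2 y hy'

-- the two filter predicates agree once the values agree
theorem pv_filter_pred (mx : Int) (l : List (String × Int)) :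
    l.filter (fun q => q.2 == mx) = l.filter (fun p => mx == p.2) := by
  apply List.filter_congr
  intro q _
  rcases eq_or_ne q.2 mx with h | h
  · simp [h]
  · simp [h, Ne.symm h]

-- the heart of the equivalence: the two selection stages agree on a nonempty averages list
theorem pv_sel_eq (l : List (String × Int)) (h : l ≠ []) : pvSelA l = pvSelB l := by
  -- A's extrema
  obtain ⟨mx, hmx⟩ : ∃ mx, PySem.List.max? (l.map (fun p => p.2)) (fun v => v) = some mx := by
    cases hmxo : PySem.List.max? (l.map (fun p => p.2)) (fun v => v) with
    | none => exact absurd (List.map_eq_nil_iff.mp ((PySem.List.max?_eq_none_iff _ _).mp hmxo)) h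
    | some m => exact ⟨m, rfl⟩
  obtain ⟨mn, hmn⟩ : ∃ mn, PySem.List.min? (l.map (fun p => p.2)) (fun v => v) = some mn := by
    cases hmno : PySem.List.min? (l.map (fun p => p.2)) (fun v => v) with
    | none => exact absurd (List.map_eq_nil_iff.mp ((PySem.List.min?_eq_none_iff _ _).mp hmno)) h
    | some m => exact ⟨m, rfl⟩
  -- B's sorted list is nonempty
  have hperm := PySem.List.sorted_perm l (fun p => p.2) false
  have hsne : PySem.List.sorted l (fun p => p.2) false ≠ [] := by
    intro he
    exact h ((he ▸ hperm).symm.eq_nil)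
  obtain ⟨m, t, hmt⟩ := List.exists_cons_of_ne_nil hsne
  have hlast : PySem.List.pyGet? (PySem.List.sorted l (fun p => p.2) false) (-1)
      = some ((PySem.List.sorted l (fun p => p.2) false).getLast hsne) := by
    rw [PySem.List.pyGet?_neg_one, List.getLast?_eq_some_getLast]
  have hhead : PySem.List.pyGet? (PySem.List.sorted l (fun p => p.2) false) 0 = some m := by
    rw [hmt]; exact PySem.List.pyGet?_zero_cons _ _
  set hi := (PySem.List.sorted l (fun p => p.2) false).getLast hsne with hhi
  -- hi's value is A's max
  have hhi_mem : hi ∈ l := hperm.mem_iff.mp (List.getLast_mem hsne)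
  have hhi_max : ∀ y ∈ l, y.2 ≤ hi.2 := by
    intro y hy
    exact pv_pairwise_getLast _ hsne (PySem.List.sorted_pairwise l (fun p => p.2)) y (hperm.mem_iff.mpr hy)
  have hmx_mem : mx ∈ l.map (fun p => p.2) := PySem.List.max?_mem hmx
  have e_hi : hi.2 = mx := by
    obtain ⟨p, hp, hpv⟩ := List.mem_map.mp hmx_mem
    exact le_antisymm (PySem.List.max?_isMax hmx _ (List.mem_map_of_mem hhi_mem))
      (hpv ▸ hhi_max p hp)
  -- m's value is A's min
  have hm_mem : m ∈ l := hperm.mem_iff.mp (hmt ▸ List.mem_cons_self)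
  have hm_min : ∀ y ∈ l, m.2 ≤ y.2 := PySem.List.key_head_sorted_le l (fun p => p.2) hmt
  have hmn_mem : mn ∈ l.map (fun p => p.2) := PySem.List.min?_mem hmn
  have e_lo : m.2 = mn := by
    obtain ⟨p, hp, hpv⟩ := List.mem_map.mp hmn_mem
    exact le_antisymm (hpv ▸ hm_min p hp)
      (PySem.List.min?_isMin hmn _ (List.mem_map_of_mem hm_mem))
  simp only [pvSelA, pvSelB, hmx, hmn, hlast, hhead, e_hi, e_lo,
    pv_filter_pred mx l, pv_filter_pred mn l]

-- a dict built by inserting the pairs of a nonempty list is nonempty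
theorem pv_pvItems_ne_nil (l : List (String × Int)) (h : l ≠ []) : pvItems l ≠ [] := by
  unfold pvItems
  obtain ⟨p, t, rfl⟩ := List.exists_cons_of_ne_nil h
  have main : ∀ (t : List (String × Int)) (d : PySem.Dict String Int), d.items ≠ [] →
      (t.foldl (fun d q => d.insert q.1 q.2) d).items ≠ [] := by
    intro t
    induction t with
    | nil => intro d hd; exact hd
    | cons q t ih =>
      intro d hd
      apply ih
      rw [PySem.Dict.items_insert]
      by_cases hc : d.contains q.1 <;> simp [hc, hd]
  show ((p :: t).foldl (fun d q => d.insert q.1 q.2) PySem.Dict.empty).items ≠ []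
  rw [List.foldl_cons]
  apply main
  simp [PySem.Dict.items_insert]

-- flattened items of data with some nonempty dict are nonempty, hence so is the averages list
theorem pv_avgs_ne_nil (data : List (List (String × Int))) (h : ∃ l ∈ data, l ≠ []) :
    pvAvgs (data.flatMap pvItems) ≠ [] := by
  obtain ⟨l, hl, hne⟩ := h
  have hflat : data.flatMap pvItems ≠ [] := by
    intro hflat
    exact pv_pvItems_ne_nil l hne (List.flatMap_eq_nil_iff.mp hflat l hl)
  unfold pvAvgs
  intro he
  rw [List.map_eq_nil_iff] at he
  have hmap : (data.flatMap pvItems).map (fun p => p.1) ≠ [] := by simpa using hflat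
  obtain ⟨x, xs, hx⟩ := List.exists_cons_of_ne_nil hmap
  rw [hx, PySem.Set.ofList_cons] at he
  simp at he

-- ===== VERDICT (by name: the statement is the Claim_ definition above) =====
theorem avrg_producing_spec : Claim_equal_avrg_producing := by
  intro data _ hpre
  unfold Spec_avrg_producing
  rw [pv_A_eq, pv_B_eq]
  exact pv_sel_eq _ (pv_avgs_ne_nil data hpre)
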